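-- pv_equiv track=rewrite | github.com/DanBatten/Infinite-ad-garden | orchestrator/main.py | _split_family_and_style
-- ===== SOURCE A (Python) =====
-- def _split_family_and_style(raw: str):
--     """Split a font string like 'Inter Bold' -> ('Inter', 'Bold').
--     If only family provided, default style to 'Regular'.
--     Accepts 'Semi Bold' and other spaced styles.
--     """
--     if not raw:
--         return (None, None)
--     value = str(raw).strip()
--     # Known styles, longer first
--     known_styles = [
--         "Extra Black", "ExtraBold", "Extra Bold",
--         "SemiBold", "Semi Bold", "DemiBold", "Demi Bold",
--         "Black", "Bold", "Medium", "Light", "Thin", "Regular", "Book", "Roman"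
--     ]
--     # Try exact suffix match
--     for style in known_styles:
--         if value.lower().endswith(style.lower()):
--             family = value[:-len(style)].strip()
--             # Normalize style spacing (e.g., 'Semi Bold' -> 'SemiBold')
--             normalized_style = style.replace(" ", "") if style in ["Semi Bold", "Demi Bold", "Extra Bold", "Extra Black"] else style
--             return (family or value, normalized_style)
--     # Fallback: only treat last token as style if it's a known style token
--     parts = value.split()
--     if len(parts) > 1:
--         last_token = parts[-1]
--         if last_token.lower() in [s.lower() for s in known_styles]:
--             return (" ".join(parts[:-1]).strip(), last_token)
--         # Otherwise, the entire value is the family; default style Regular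
--         return (value, "Regular")
--     return (value, "Regular")
-- ===== SOURCE B (Python) =====
-- # B: suffix lookup by length — instead of scanning 15 styles, take the last-k
-- # characters of the lowercased value for each distinct style length k (longest
-- # first) and look the suffix up in one normalization dict.
--
-- _STYLE_MAP = {
--     "extra black": "ExtraBlack",
--     "extra bold": "ExtraBold",
--     "extrabold": "ExtraBold",
--     "semi bold": "SemiBold",
--     "semibold": "SemiBold",
--     "demi bold": "DemiBold",
--     "demibold": "DemiBold",
--     "regular": "Regular",
--     "medium": "Medium",
--     "black": "Black",
--     "light": "Light",
--     "roman": "Roman",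
--     "bold": "Bold",
--     "thin": "Thin",
--     "book": "Book",
-- }
--
-- # Distinct key lengths, descending (longest suffix wins, like the loop in A).
-- _LENGTHS = [11, 10, 9, 8, 7, 6, 5, 4]
--
--
-- def _split_family_and_style(raw: str):
--     if not raw:
--         return (None, None)
--     value = str(raw).strip()
--     low = value.lower()
--     n = len(low)
--     for k in _LENGTHS:
--         if k <= n:
--             style = _STYLE_MAP.get(low[n - k:])
--             if style is not None:
--                 family = value[:n - k].strip()
--                 return (family or value, style)
--     return (value, "Regular")
-- ===== Notes on version B (the rewrite author's own statement) =====
-- stated objective: alternative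
-- what changed: A scans all 15 known styles, lowercasing the value and testing endswith for each; B lowercases once and, for each of the 8 distinct style lengths (longest first), looks the length-k suffix up in a single normalization dict mapping lowercased style to its canonical de-spaced form.
import Mathlib
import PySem

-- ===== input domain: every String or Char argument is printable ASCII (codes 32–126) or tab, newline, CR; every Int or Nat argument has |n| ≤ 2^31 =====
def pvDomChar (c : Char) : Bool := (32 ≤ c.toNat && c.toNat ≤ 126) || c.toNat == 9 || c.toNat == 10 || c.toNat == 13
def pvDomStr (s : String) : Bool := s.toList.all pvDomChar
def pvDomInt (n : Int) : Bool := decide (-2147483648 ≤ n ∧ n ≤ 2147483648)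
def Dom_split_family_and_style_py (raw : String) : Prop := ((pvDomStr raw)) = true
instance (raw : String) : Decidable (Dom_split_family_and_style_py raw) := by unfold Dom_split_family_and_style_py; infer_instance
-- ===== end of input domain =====

-- B replaces A's 15-iteration style-suffix scan by a single normalization dict
-- keyed by the lowercased suffix, probed once per distinct style length (longest
-- first); objective: faster/alternative matching mechanism, same return values.

-- ===== PORT A =====
def pvAStyles : List String :=
  ["Extra Black", "ExtraBold", "Extra Bold",
   "SemiBold", "Semi Bold", "DemiBold", "Demi Bold",
   "Black", "Bold", "Medium", "Light", "Thin", "Regular", "Book", "Roman"]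

-- fallback after the loop; `parts[-1]` is guarded by `parts.length > 1`,
-- so the `.getD ""` default of the IndexError-free pyGet? is never used
def pvAFallback (value : String) : Option String × Option String :=
  let parts := PySem.Str.split₀ value
  if parts.length > 1 then
    let last_token := (PySem.List.pyGet? parts (-1)).getD ""
    if (pvAStyles.map (fun s => PySem.Str.lower s)).contains (PySem.Str.lower last_token) then
      (some (PySem.Str.strip (PySem.Str.join " " (PySem.List.slice parts none (some (-1))))),
       some last_token)
    else (some value, some "Regular")
  else (some value, some "Regular")

def pvALoop (value : String) : List String → Option String × Option String
  | [] => pvAFallback value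
  | style :: rest =>
    if PySem.Str.endswith (PySem.Str.lower value) (PySem.Str.lower style) then
      let family := PySem.Str.strip (PySem.Str.slice value none (some (-(PySem.Str.len style))))
      let normalized :=
        if style ∈ ["Semi Bold", "Demi Bold", "Extra Bold", "Extra Black"]
        then PySem.Str.replace style " " "" else style
      (some (if family = "" then value else family), some normalized)
    else pvALoop value rest

def split_family_and_style_py (raw : String) : Option String × Option String :=
  if raw = "" then (none, none)
  else pvALoop (PySem.Str.strip raw) pvAStyles

-- ===== PORT B =====
def pvBMap : PySem.Dict String String := PySem.Dict.mk
  [("extra black", "ExtraBlack"), ("extra bold", "ExtraBold"), ("extrabold", "ExtraBold"),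
   ("semi bold", "SemiBold"), ("semibold", "SemiBold"),
   ("demi bold", "DemiBold"), ("demibold", "DemiBold"),
   ("regular", "Regular"), ("medium", "Medium"), ("black", "Black"),
   ("light", "Light"), ("roman", "Roman"), ("bold", "Bold"), ("thin", "Thin"), ("book", "Book")]

def pvBLengths : List Int := [11, 10, 9, 8, 7, 6, 5, 4]

def pvBLoop (value low : String) (n : Int) : List Int → Option String × Option String
  | [] => (some value, some "Regular")
  | k :: rest =>
    if k ≤ n then
      match pvBMap.get? (PySem.Str.slice low (some (n - k)) none) with
      | some style =>
        let family := PySem.Str.strip (PySem.Str.slice value none (some (n - k)))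
        (some (if family = "" then value else family), some style)
      | none => pvBLoop value low n rest
    else pvBLoop value low n rest

def split_family_and_style_py_alt (raw : String) : Option String × Option String :=
  if raw = "" then (none, none)
  else
    let value := PySem.Str.strip raw
    let low := PySem.Str.lower value
    pvBLoop value low (PySem.Str.len low) pvBLengths

-- ===== PRECONDITION & SPEC =====
def Spec_split_family_and_style_py (raw : String) (out : Option String × Option String) : Prop := out = split_family_and_style_py_alt raw
instance (raw : String) (out : Option String × Option String) : Decidable (Spec_split_family_and_style_py raw out) := by unfold Spec_split_family_and_style_py; infer_instance

-- ===== CLAIM (what is proved, stated in full; the proofs are below) =====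
def Claim_equal_split_family_and_style_py : Prop := ∀ (raw : String), Dom_split_family_and_style_py raw → Spec_split_family_and_style_py raw (split_family_and_style_py raw)

-- ===== LEMMAS AND PROOFS =====

-- endswith as an IsSuffix proposition
theorem pvEndsTrue {L key : List Char} (h : key <:+ L) : PySem.Chars.endswith L key = true :=
  (PySem.Chars.endswith_iff L key).mpr h

theorem pvEndsFalse {L key : List Char} (h : ¬ key <:+ L) : PySem.Chars.endswith L key = false := by
  rw [Bool.eq_false_iff]
  exact fun ht => h ((PySem.Chars.endswith_iff L key).mp ht)

-- A's loop condition, with the style literal lowered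
theorem pvCondEq (v s : String) (key : List Char) (hkey : PySem.Chars.lower s.toList = key) :
    PySem.Str.endswith (PySem.Str.lower v) (PySem.Str.lower s)
      = PySem.Chars.endswith (PySem.Chars.lower v.toList) key := by
  rw [PySem.Str.endswith_eq, PySem.Str.toList_lower, PySem.Str.toList_lower, hkey]

-- two suffixes of the same list: the shorter is a tail of the longer
theorem pvKill {L : List Char} (key key' : List Char) (h : key <:+ L)
    (hlen : key.length ≤ key'.length)
    (hne : key ≠ key'.drop (key'.length - key.length)) : ¬ key' <:+ L := by
  intro h'
  apply hne
  have e1 := List.suffix_iff_eq_drop.mp h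
  have e2 := List.suffix_iff_eq_drop.mp h'
  have hl' : key'.length ≤ L.length := h'.length_le
  calc key = L.drop (L.length - key.length) := e1
    _ = L.drop (L.length - key'.length + (key'.length - key.length)) := by congr 1; omega
    _ = (L.drop (L.length - key'.length)).drop (key'.length - key.length) := (List.drop_drop).symm
    _ = key'.drop (key'.length - key.length) := by rw [← e2]

-- one loop step of A
theorem pvALoop_skip (value style : String) (rest : List String)
    (h : PySem.Str.endswith (PySem.Str.lower value) (PySem.Str.lower style) = false) :
    pvALoop value (style :: rest) = pvALoop value rest := by
  simp only [pvALoop, h]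
  rfl

theorem pvALoop_hit (value style : String) (rest : List String)
    (h : PySem.Str.endswith (PySem.Str.lower value) (PySem.Str.lower style) = true) :
    pvALoop value (style :: rest) =
      (some (if PySem.Str.strip (PySem.Str.slice value none (some (-(PySem.Str.len style)))) = ""
             then value
             else PySem.Str.strip (PySem.Str.slice value none (some (-(PySem.Str.len style))))),
       some (if style ∈ ["Semi Bold", "Demi Bold", "Extra Bold", "Extra Black"]
             then PySem.Str.replace style " " "" else style)) := by
  simp only [pvALoop, h]
  rfl

-- one loop step of B
theorem pvBLoop_skip (value low : String) (n k : Int) (rest : List Int)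
    (h : k ≤ n → pvBMap.get? (PySem.Str.slice low (some (n - k)) none) = none) :
    pvBLoop value low n (k :: rest) = pvBLoop value low n rest := by
  simp only [pvBLoop]
  by_cases hg : k ≤ n
  · rw [if_pos hg, h hg]
  · rw [if_neg hg]

theorem pvBLoop_hit (value low : String) (n k : Int) (rest : List Int) (hg : k ≤ n)
    (st : String)
    (hget : pvBMap.get? (PySem.Str.slice low (some (n - k)) none) = some st) :
    pvBLoop value low n (k :: rest) =
      (some (if PySem.Str.strip (PySem.Str.slice value none (some (n - k))) = ""
             then value
             else PySem.Str.strip (PySem.Str.slice value none (some (n - k)))),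
       some st) := by
  simp only [pvBLoop, if_pos hg, hget]

-- the toList of B's suffix probe
theorem pvQList (v : String) (k : Int) (h0 : 0 ≤ k) (hk : k ≤ (v.toList.length : Int)) :
    (PySem.Str.slice (PySem.Str.lower v) (some ((v.toList.length : Int) - k)) none).toList
      = (PySem.Chars.lower v.toList).drop (v.toList.length - k.toNat) := by
  rw [PySem.Str.toList_slice, PySem.Chars.slice_eq_listSlice, PySem.Str.toList_lower]
  rw [PySem.List.slice_from _ (by omega : (0:Int) ≤ (v.toList.length : Int) - k)]
  congr 1
  omega

theorem pvLowerLen (v : String) : (PySem.Chars.lower v.toList).length = v.toList.length := by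
  simp [PySem.Chars.lower]

theorem pvQLen (v : String) (k : Int) (h0 : 0 ≤ k) (hk : k ≤ (v.toList.length : Int)) :
    (PySem.Str.slice (PySem.Str.lower v) (some ((v.toList.length : Int) - k)) none).toList.length
      = k.toNat := by
  rw [pvQList v k h0 hk, List.length_drop, pvLowerLen]
  omega

-- B's probe equals a stored key iff that key is a suffix of the lowered value
theorem pvQEqKey (v : String) (k : Int) (h0 : 0 ≤ k) (hk : k ≤ (v.toList.length : Int))
    (key : String) (hlen : key.toList.length = k.toNat) :
    (PySem.Str.slice (PySem.Str.lower v) (some ((v.toList.length : Int) - k)) none) = key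
      ↔ key.toList <:+ PySem.Chars.lower v.toList := by
  rw [← String.toList_inj, pvQList v k h0 hk]
  constructor
  · intro h
    rw [List.suffix_iff_eq_drop, pvLowerLen, hlen, ← h]
  · intro h
    have := List.suffix_iff_eq_drop.mp h
    rw [pvLowerLen, hlen] at this
    exact this.symm

theorem pvBeqFalse (v : String) (k : Int) (h0 : 0 ≤ k) (hk : k ≤ (v.toList.length : Int))
    (key : String) (hlen : key.toList.length ≠ k.toNat) :
    (key == PySem.Str.slice (PySem.Str.lower v) (some ((v.toList.length : Int) - k)) none) = false := by
  rw [beq_eq_false_iff_ne]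
  intro he
  apply hlen
  rw [he, pvQLen v k h0 hk]

theorem pvBeqEq (v : String) (k : Int) (h0 : 0 ≤ k) (hk : k ≤ (v.toList.length : Int))
    (key : String) (hlen : key.toList.length = k.toNat) :
    (key == PySem.Str.slice (PySem.Str.lower v) (some ((v.toList.length : Int) - k)) none)
      = PySem.Chars.endswith (PySem.Chars.lower v.toList) key.toList := by
  by_cases hsuf : key.toList <:+ PySem.Chars.lower v.toList
  · rw [pvEndsTrue hsuf, beq_iff_eq]
    exact ((pvQEqKey v k h0 hk key hlen).mpr hsuf).symm
  · rw [pvEndsFalse hsuf, beq_eq_false_iff_ne]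
    intro he
    exact hsuf ((pvQEqKey v k h0 hk key hlen).mp he.symm)

-- the two family slices (A: value[:-k], B: value[:n-k]) agree
theorem pvFamEq (v : String) (a b : Int) (kn : Nat)
    (ha : a = -(kn : Int)) (hb : b = (v.toList.length : Int) - (kn : Int))
    (h0 : 0 < kn) (hkn : kn ≤ v.toList.length) :
    PySem.Str.strip (PySem.Str.slice v none (some a))
      = PySem.Str.strip (PySem.Str.slice v none (some b)) := by
  apply String.toList_inj.mp
  rw [PySem.Str.toList_strip, PySem.Str.toList_strip]
  congr 1
  rw [PySem.Str.toList_slice, PySem.Str.toList_slice,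
      PySem.Chars.slice_eq_listSlice, PySem.Chars.slice_eq_listSlice, ha, hb]
  rw [PySem.List.slice_to_neg_natCast v.toList kn h0,
      PySem.List.slice_to _ (by omega : (0:Int) ≤ (v.toList.length : Int) - (kn : Int))]
  congr 1
  omega

-- parts[-1] of a nonempty list is its last element
theorem pvPyGetNeg1 {α : Type} (xs : List α) (h : xs ≠ []) :
    PySem.List.pyGet? xs (-1) = xs.getLast? := by
  have hl : 0 < xs.length := List.length_pos_iff.mpr h
  simp only [PySem.List.pyGet?, PySem.List.pyIdx?]
  rw [if_neg (by omega), if_pos (by exact_mod_cast by omega : -(xs.length : Int) ≤ -1)]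
  simp only [Option.bind_some]
  rw [List.getLast?_eq_getElem?]
  norm_num

-- the last word produced by split₀'s worker is a suffix of the processed text
theorem pvGoLast (s : List Char) : ∀ (cur : List Char) (acc : List (List Char)) (w : List Char),
    (∀ c', s.getLast? = some c' → PySem.Chars.isspace c' = false) →
    (PySem.Chars.split₀.go s cur acc).getLast? = some w →
    w <:+ (cur.reverse ++ s) ∨ (cur.reverse ++ s = [] ∧ acc.reverse.getLast? = some w) := by
  induction s with
  | nil =>
    intro cur acc w _ hlast
    simp only [PySem.Chars.split₀.go] at hlast
    by_cases hc : cur.isEmpty = true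
    · right
      rw [if_pos hc] at hlast
      refine ⟨by simp [List.isEmpty_iff.mp hc], hlast⟩
    · left
      rw [if_neg hc] at hlast
      rw [List.getLast?_reverse] at hlast
      simp only [List.head?_cons, Option.some.injEq] at hlast
      subst hlast
      simp
  | cons c rest ih =>
    intro cur acc w hs hlast
    simp only [PySem.Chars.split₀.go] at hlast
    by_cases hspace : PySem.Chars.isspace c = true
    · have hrest : rest ≠ [] := by
        intro h
        subst h
        have := hs c (by simp)
        rw [hspace] at this
        cases this
      have hs' : ∀ c', rest.getLast? = some c' → PySem.Chars.isspace c' = false := by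
        intro c' h'
        obtain ⟨r, rs, rfl⟩ := List.exists_cons_of_ne_nil hrest
        exact hs c' (by rw [List.getLast?_cons_cons]; exact h')
      rw [if_pos hspace] at hlast
      have step : ∀ acc', (PySem.Chars.split₀.go rest [] acc').getLast? = some w →
          w <:+ cur.reverse ++ c :: rest := by
        intro acc' hl'
        rcases ih [] acc' w hs' hl' with h | ⟨hcomb, _⟩
        · simp only [List.reverse_nil, List.nil_append] at h
          exact h.trans ((List.suffix_cons c rest).trans (List.suffix_append cur.reverse (c :: rest)))
        · simp only [List.reverse_nil, List.nil_append] at hcomb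
          exact absurd hcomb hrest
      by_cases hc : cur.isEmpty = true
      · rw [if_pos hc] at hlast
        exact Or.inl (step acc hlast)
      · rw [if_neg hc] at hlast
        exact Or.inl (step (cur.reverse :: acc) hlast)
    · rw [if_neg hspace] at hlast
      have hs' : ∀ c', rest.getLast? = some c' → PySem.Chars.isspace c' = false := by
        intro c' h'
        rcases rest with _ | ⟨r, rs⟩
        · simp at h'
        · exact hs c' (by rw [List.getLast?_cons_cons]; exact h')
      rcases ih (c :: cur) acc w hs' hlast with h | ⟨hcomb, _⟩
      · left
        simpa [List.append_assoc] using h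
      · simp at hcomb
-- a stripped string has no trailing whitespace
theorem pvStripNoTrail (s : String) :
    ∀ c', (PySem.Str.strip s).toList.getLast? = some c' → PySem.Chars.isspace c' = false := by
  intro c' h
  rw [PySem.Str.toList_strip] at h
  simp only [PySem.Chars.strip, PySem.Chars.rstrip, List.getLast?_reverse] at h
  have hne : (PySem.Chars.lstrip s.toList).reverse.dropWhile PySem.Chars.isspace ≠ [] := by
    intro hnil
    rw [hnil] at h
    simp at h
  have hh := List.head_dropWhile_not PySem.Chars.isspace hne
  rw [List.head?_eq_some_head hne, Option.some.injEq] at h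
  rw [← h]
  exact hh

-- the fallback returns (value, "Regular") when no style is a suffix
theorem pvFallbackEq (v : String)
    (hv : ∀ c', v.toList.getLast? = some c' → PySem.Chars.isspace c' = false)
    (hall : ∀ s ∈ pvAStyles, ¬ PySem.Chars.lower s.toList <:+ PySem.Chars.lower v.toList) :
    pvAFallback v = (some v, some "Regular") := by
  simp only [pvAFallback]
  split_ifs with hlen hmem
  · exfalso
    have hne : PySem.Str.split₀ v ≠ [] := by
      intro h
      rw [h] at hlen
      simp at hlen
    obtain ⟨w, hw⟩ := Option.isSome_iff_exists.mp (List.getLast?_isSome.mpr hne)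
    rw [pvPyGetNeg1 _ hne, hw] at hmem
    simp only [Option.getD_some] at hmem
    have hmem' : PySem.Str.lower w ∈ pvAStyles.map (fun s => PySem.Str.lower s) :=
      List.contains_iff_mem.mp hmem
    obtain ⟨s, hs, hlow⟩ := List.mem_map.mp hmem'
    -- w is a suffix of v
    have hwl : (PySem.Chars.split₀ v.toList).getLast? = some w.toList := by
      rw [← PySem.Str.split₀_map_toList, List.getLast?_map, hw]
      rfl
    have hsuf : w.toList <:+ v.toList := by
      rcases pvGoLast v.toList [] [] w.toList hv hwl with h | ⟨_, hacc⟩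
      · simpa using h
      · simp at hacc
    apply hall s hs
    have hkey : PySem.Chars.lower s.toList = PySem.Chars.lower w.toList := by
      rw [← PySem.Str.toList_lower, ← PySem.Str.toList_lower, hlow]
    rw [hkey]
    simpa [PySem.Chars.lower] using List.IsSuffix.map PySem.Chars.lowerChar hsuf
  · rfl
  · rfl

-- main equivalence of the two loops, for a stripped value
theorem pvGetNil (x : String) :
    (PySem.Dict.mk ([] : List (String × String))).get? x = none := rfl

theorem pvSufLen (v : String) {key : List Char} (kn : Nat) (hkey : key.length = kn)
    (h : key <:+ PySem.Chars.lower v.toList) : (kn:Int) ≤ (v.toList.length : Int) := by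
  have hle := h.length_le
  rw [pvLowerLen, hkey] at hle
  exact_mod_cast hle

theorem pvGet11 (v : String) (hk : (11:Int) ≤ (v.toList.length : Int)) :
    pvBMap.get? (PySem.Str.slice (PySem.Str.lower v) (some ((v.toList.length : Int) - 11)) none)
      = (if PySem.Chars.endswith (PySem.Chars.lower v.toList) "extra black".toList then some "ExtraBlack" else none) := by
  have h0 : (0:Int) ≤ 11 := by norm_num
  simp only [pvBMap, PySem.Dict.get?_mk_cons,
    pvBeqEq v 11 h0 hk "extra black" (by decide),
    pvBeqFalse v 11 h0 hk "extra bold" (by decide),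
    pvBeqFalse v 11 h0 hk "extrabold" (by decide),
    pvBeqFalse v 11 h0 hk "semi bold" (by decide),
    pvBeqFalse v 11 h0 hk "semibold" (by decide),
    pvBeqFalse v 11 h0 hk "demi bold" (by decide),
    pvBeqFalse v 11 h0 hk "demibold" (by decide),
    pvBeqFalse v 11 h0 hk "regular" (by decide),
    pvBeqFalse v 11 h0 hk "medium" (by decide),
    pvBeqFalse v 11 h0 hk "black" (by decide),
    pvBeqFalse v 11 h0 hk "light" (by decide),
    pvBeqFalse v 11 h0 hk "roman" (by decide),
    pvBeqFalse v 11 h0 hk "bold" (by decide),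
    pvBeqFalse v 11 h0 hk "thin" (by decide),
    pvBeqFalse v 11 h0 hk "book" (by decide)]
  simp only [pvGetNil]
  rfl

theorem pvGet10 (v : String) (hk : (10:Int) ≤ (v.toList.length : Int)) :
    pvBMap.get? (PySem.Str.slice (PySem.Str.lower v) (some ((v.toList.length : Int) - 10)) none)
      = (if PySem.Chars.endswith (PySem.Chars.lower v.toList) "extra bold".toList then some "ExtraBold" else none) := by
  have h0 : (0:Int) ≤ 10 := by norm_num
  simp only [pvBMap, PySem.Dict.get?_mk_cons,
    pvBeqFalse v 10 h0 hk "extra black" (by decide),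
    pvBeqEq v 10 h0 hk "extra bold" (by decide),
    pvBeqFalse v 10 h0 hk "extrabold" (by decide),
    pvBeqFalse v 10 h0 hk "semi bold" (by decide),
    pvBeqFalse v 10 h0 hk "semibold" (by decide),
    pvBeqFalse v 10 h0 hk "demi bold" (by decide),
    pvBeqFalse v 10 h0 hk "demibold" (by decide),
    pvBeqFalse v 10 h0 hk "regular" (by decide),
    pvBeqFalse v 10 h0 hk "medium" (by decide),
    pvBeqFalse v 10 h0 hk "black" (by decide),
    pvBeqFalse v 10 h0 hk "light" (by decide),
    pvBeqFalse v 10 h0 hk "roman" (by decide),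
    pvBeqFalse v 10 h0 hk "bold" (by decide),
    pvBeqFalse v 10 h0 hk "thin" (by decide),
    pvBeqFalse v 10 h0 hk "book" (by decide)]
  simp only [pvGetNil]
  rfl

theorem pvGet9 (v : String) (hk : (9:Int) ≤ (v.toList.length : Int)) :
    pvBMap.get? (PySem.Str.slice (PySem.Str.lower v) (some ((v.toList.length : Int) - 9)) none)
      = (if PySem.Chars.endswith (PySem.Chars.lower v.toList) "extrabold".toList then some "ExtraBold" else (if PySem.Chars.endswith (PySem.Chars.lower v.toList) "semi bold".toList then some "SemiBold" else (if PySem.Chars.endswith (PySem.Chars.lower v.toList) "demi bold".toList then some "DemiBold" else none))) := by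
  have h0 : (0:Int) ≤ 9 := by norm_num
  simp only [pvBMap, PySem.Dict.get?_mk_cons,
    pvBeqFalse v 9 h0 hk "extra black" (by decide),
    pvBeqFalse v 9 h0 hk "extra bold" (by decide),
    pvBeqEq v 9 h0 hk "extrabold" (by decide),
    pvBeqEq v 9 h0 hk "semi bold" (by decide),
    pvBeqFalse v 9 h0 hk "semibold" (by decide),
    pvBeqEq v 9 h0 hk "demi bold" (by decide),
    pvBeqFalse v 9 h0 hk "demibold" (by decide),
    pvBeqFalse v 9 h0 hk "regular" (by decide),
    pvBeqFalse v 9 h0 hk "medium" (by decide),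
    pvBeqFalse v 9 h0 hk "black" (by decide),
    pvBeqFalse v 9 h0 hk "light" (by decide),
    pvBeqFalse v 9 h0 hk "roman" (by decide),
    pvBeqFalse v 9 h0 hk "bold" (by decide),
    pvBeqFalse v 9 h0 hk "thin" (by decide),
    pvBeqFalse v 9 h0 hk "book" (by decide)]
  simp only [pvGetNil]
  rfl

theorem pvGet8 (v : String) (hk : (8:Int) ≤ (v.toList.length : Int)) :
    pvBMap.get? (PySem.Str.slice (PySem.Str.lower v) (some ((v.toList.length : Int) - 8)) none)
      = (if PySem.Chars.endswith (PySem.Chars.lower v.toList) "semibold".toList then some "SemiBold" else (if PySem.Chars.endswith (PySem.Chars.lower v.toList) "demibold".toList then some "DemiBold" else none)) := by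
  have h0 : (0:Int) ≤ 8 := by norm_num
  simp only [pvBMap, PySem.Dict.get?_mk_cons,
    pvBeqFalse v 8 h0 hk "extra black" (by decide),
    pvBeqFalse v 8 h0 hk "extra bold" (by decide),
    pvBeqFalse v 8 h0 hk "extrabold" (by decide),
    pvBeqFalse v 8 h0 hk "semi bold" (by decide),
    pvBeqEq v 8 h0 hk "semibold" (by decide),
    pvBeqFalse v 8 h0 hk "demi bold" (by decide),
    pvBeqEq v 8 h0 hk "demibold" (by decide),
    pvBeqFalse v 8 h0 hk "regular" (by decide),
    pvBeqFalse v 8 h0 hk "medium" (by decide),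
    pvBeqFalse v 8 h0 hk "black" (by decide),
    pvBeqFalse v 8 h0 hk "light" (by decide),
    pvBeqFalse v 8 h0 hk "roman" (by decide),
    pvBeqFalse v 8 h0 hk "bold" (by decide),
    pvBeqFalse v 8 h0 hk "thin" (by decide),
    pvBeqFalse v 8 h0 hk "book" (by decide)]
  simp only [pvGetNil]
  rfl

theorem pvGet7 (v : String) (hk : (7:Int) ≤ (v.toList.length : Int)) :
    pvBMap.get? (PySem.Str.slice (PySem.Str.lower v) (some ((v.toList.length : Int) - 7)) none)
      = (if PySem.Chars.endswith (PySem.Chars.lower v.toList) "regular".toList then some "Regular" else none) := by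
  have h0 : (0:Int) ≤ 7 := by norm_num
  simp only [pvBMap, PySem.Dict.get?_mk_cons,
    pvBeqFalse v 7 h0 hk "extra black" (by decide),
    pvBeqFalse v 7 h0 hk "extra bold" (by decide),
    pvBeqFalse v 7 h0 hk "extrabold" (by decide),
    pvBeqFalse v 7 h0 hk "semi bold" (by decide),
    pvBeqFalse v 7 h0 hk "semibold" (by decide),
    pvBeqFalse v 7 h0 hk "demi bold" (by decide),
    pvBeqFalse v 7 h0 hk "demibold" (by decide),
    pvBeqEq v 7 h0 hk "regular" (by decide),
    pvBeqFalse v 7 h0 hk "medium" (by decide),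
    pvBeqFalse v 7 h0 hk "black" (by decide),
    pvBeqFalse v 7 h0 hk "light" (by decide),
    pvBeqFalse v 7 h0 hk "roman" (by decide),
    pvBeqFalse v 7 h0 hk "bold" (by decide),
    pvBeqFalse v 7 h0 hk "thin" (by decide),
    pvBeqFalse v 7 h0 hk "book" (by decide)]
  simp only [pvGetNil]
  rfl

theorem pvGet6 (v : String) (hk : (6:Int) ≤ (v.toList.length : Int)) :
    pvBMap.get? (PySem.Str.slice (PySem.Str.lower v) (some ((v.toList.length : Int) - 6)) none)
      = (if PySem.Chars.endswith (PySem.Chars.lower v.toList) "medium".toList then some "Medium" else none) := by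
  have h0 : (0:Int) ≤ 6 := by norm_num
  simp only [pvBMap, PySem.Dict.get?_mk_cons,
    pvBeqFalse v 6 h0 hk "extra black" (by decide),
    pvBeqFalse v 6 h0 hk "extra bold" (by decide),
    pvBeqFalse v 6 h0 hk "extrabold" (by decide),
    pvBeqFalse v 6 h0 hk "semi bold" (by decide),
    pvBeqFalse v 6 h0 hk "semibold" (by decide),
    pvBeqFalse v 6 h0 hk "demi bold" (by decide),
    pvBeqFalse v 6 h0 hk "demibold" (by decide),
    pvBeqFalse v 6 h0 hk "regular" (by decide),
    pvBeqEq v 6 h0 hk "medium" (by decide),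
    pvBeqFalse v 6 h0 hk "black" (by decide),
    pvBeqFalse v 6 h0 hk "light" (by decide),
    pvBeqFalse v 6 h0 hk "roman" (by decide),
    pvBeqFalse v 6 h0 hk "bold" (by decide),
    pvBeqFalse v 6 h0 hk "thin" (by decide),
    pvBeqFalse v 6 h0 hk "book" (by decide)]
  simp only [pvGetNil]
  rfl

theorem pvGet5 (v : String) (hk : (5:Int) ≤ (v.toList.length : Int)) :
    pvBMap.get? (PySem.Str.slice (PySem.Str.lower v) (some ((v.toList.length : Int) - 5)) none)
      = (if PySem.Chars.endswith (PySem.Chars.lower v.toList) "black".toList then some "Black" else (if PySem.Chars.endswith (PySem.Chars.lower v.toList) "light".toList then some "Light" else (if PySem.Chars.endswith (PySem.Chars.lower v.toList) "roman".toList then some "Roman" else none))) := by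
  have h0 : (0:Int) ≤ 5 := by norm_num
  simp only [pvBMap, PySem.Dict.get?_mk_cons,
    pvBeqFalse v 5 h0 hk "extra black" (by decide),
    pvBeqFalse v 5 h0 hk "extra bold" (by decide),
    pvBeqFalse v 5 h0 hk "extrabold" (by decide),
    pvBeqFalse v 5 h0 hk "semi bold" (by decide),
    pvBeqFalse v 5 h0 hk "semibold" (by decide),
    pvBeqFalse v 5 h0 hk "demi bold" (by decide),
    pvBeqFalse v 5 h0 hk "demibold" (by decide),
    pvBeqFalse v 5 h0 hk "regular" (by decide),
    pvBeqFalse v 5 h0 hk "medium" (by decide),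
    pvBeqEq v 5 h0 hk "black" (by decide),
    pvBeqEq v 5 h0 hk "light" (by decide),
    pvBeqEq v 5 h0 hk "roman" (by decide),
    pvBeqFalse v 5 h0 hk "bold" (by decide),
    pvBeqFalse v 5 h0 hk "thin" (by decide),
    pvBeqFalse v 5 h0 hk "book" (by decide)]
  simp only [pvGetNil]
  rfl

theorem pvGet4 (v : String) (hk : (4:Int) ≤ (v.toList.length : Int)) :
    pvBMap.get? (PySem.Str.slice (PySem.Str.lower v) (some ((v.toList.length : Int) - 4)) none)
      = (if PySem.Chars.endswith (PySem.Chars.lower v.toList) "bold".toList then some "Bold" else (if PySem.Chars.endswith (PySem.Chars.lower v.toList) "thin".toList then some "Thin" else (if PySem.Chars.endswith (PySem.Chars.lower v.toList) "book".toList then some "Book" else none))) := by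
  have h0 : (0:Int) ≤ 4 := by norm_num
  simp only [pvBMap, PySem.Dict.get?_mk_cons,
    pvBeqFalse v 4 h0 hk "extra black" (by decide),
    pvBeqFalse v 4 h0 hk "extra bold" (by decide),
    pvBeqFalse v 4 h0 hk "extrabold" (by decide),
    pvBeqFalse v 4 h0 hk "semi bold" (by decide),
    pvBeqFalse v 4 h0 hk "semibold" (by decide),
    pvBeqFalse v 4 h0 hk "demi bold" (by decide),
    pvBeqFalse v 4 h0 hk "demibold" (by decide),
    pvBeqFalse v 4 h0 hk "regular" (by decide),
    pvBeqFalse v 4 h0 hk "medium" (by decide),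
    pvBeqFalse v 4 h0 hk "black" (by decide),
    pvBeqFalse v 4 h0 hk "light" (by decide),
    pvBeqFalse v 4 h0 hk "roman" (by decide),
    pvBeqEq v 4 h0 hk "bold" (by decide),
    pvBeqEq v 4 h0 hk "thin" (by decide),
    pvBeqEq v 4 h0 hk "book" (by decide)]
  simp only [pvGetNil]
  rfl

theorem pvLoopsEq (v : String)
    (hv : ∀ c', v.toList.getLast? = some c' → PySem.Chars.isspace c' = false) :
    pvALoop v pvAStyles
      = pvBLoop v (PySem.Str.lower v) (PySem.Str.len (PySem.Str.lower v)) pvBLengths := by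
  have hn : PySem.Str.len (PySem.Str.lower v) = (v.toList.length : Int) := by
    rw [PySem.Str.len_eq, PySem.Str.toList_lower, pvLowerLen]
  rw [hn]
  simp only [pvBLengths, pvAStyles]
  by_cases h1 : "extra black".toList <:+ PySem.Chars.lower v.toList
  · have hb : ((11:Int)) ≤ (v.toList.length : Int) := pvSufLen v 11 (by decide) h1
    rw [pvALoop_hit v "Extra Black" _ (by rw [pvCondEq v "Extra Black" "extra black".toList (by decide)]; exact pvEndsTrue h1)]
    rw [pvBLoop_hit v (PySem.Str.lower v) _ _ _ hb "ExtraBlack" (by rw [pvGet11 v hb, pvEndsTrue h1]; simp)]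
    rw [pvFamEq v (-(PySem.Str.len "Extra Black")) ((v.toList.length : Int) - 11) 11 (by decide) (by norm_num) (by norm_num) (by exact_mod_cast hb)]
    rw [show (if ("Extra Black":String) ∈ (["Semi Bold", "Demi Bold", "Extra Bold", "Extra Black"]:List String) then PySem.Str.replace "Extra Black" " " "" else "Extra Black") = "ExtraBlack" from by decide]
  by_cases h2 : "extrabold".toList <:+ PySem.Chars.lower v.toList
  · have hb : ((9:Int)) ≤ (v.toList.length : Int) := pvSufLen v 9 (by decide) h2
    have nk_extra_bold : ¬ ("extra bold".toList) <:+ PySem.Chars.lower v.toList := pvKill "extrabold".toList "extra bold".toList h2 (by decide) (by decide)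
    rw [pvALoop_skip v "Extra Black" _ (by rw [pvCondEq v "Extra Black" "extra black".toList (by decide)]; exact pvEndsFalse h1), pvALoop_hit v "ExtraBold" _ (by rw [pvCondEq v "ExtraBold" "extrabold".toList (by decide)]; exact pvEndsTrue h2)]
    rw [pvBLoop_skip v (PySem.Str.lower v) _ _ _ (fun hg => by rw [pvGet11 v hg, pvEndsFalse h1]; simp)]
    rw [pvBLoop_skip v (PySem.Str.lower v) _ _ _ (fun hg => by rw [pvGet10 v hg, pvEndsFalse nk_extra_bold]; simp)]
    rw [pvBLoop_hit v (PySem.Str.lower v) _ _ _ hb "ExtraBold" (by rw [pvGet9 v hb, pvEndsTrue h2]; simp)]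
    rw [pvFamEq v (-(PySem.Str.len "ExtraBold")) ((v.toList.length : Int) - 9) 9 (by decide) (by norm_num) (by norm_num) (by exact_mod_cast hb)]
    rw [show (if ("ExtraBold":String) ∈ (["Semi Bold", "Demi Bold", "Extra Bold", "Extra Black"]:List String) then PySem.Str.replace "ExtraBold" " " "" else "ExtraBold") = "ExtraBold" from by decide]
  by_cases h3 : "extra bold".toList <:+ PySem.Chars.lower v.toList
  · have hb : ((10:Int)) ≤ (v.toList.length : Int) := pvSufLen v 10 (by decide) h3
    rw [pvALoop_skip v "Extra Black" _ (by rw [pvCondEq v "Extra Black" "extra black".toList (by decide)]; exact pvEndsFalse h1), pvALoop_skip v "ExtraBold" _ (by rw [pvCondEq v "ExtraBold" "extrabold".toList (by decide)]; exact pvEndsFalse h2), pvALoop_hit v "Extra Bold" _ (by rw [pvCondEq v "Extra Bold" "extra bold".toList (by decide)]; exact pvEndsTrue h3)]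
    rw [pvBLoop_skip v (PySem.Str.lower v) _ _ _ (fun hg => by rw [pvGet11 v hg, pvEndsFalse h1]; simp)]
    rw [pvBLoop_hit v (PySem.Str.lower v) _ _ _ hb "ExtraBold" (by rw [pvGet10 v hb, pvEndsTrue h3]; simp)]
    rw [pvFamEq v (-(PySem.Str.len "Extra Bold")) ((v.toList.length : Int) - 10) 10 (by decide) (by norm_num) (by norm_num) (by exact_mod_cast hb)]
    rw [show (if ("Extra Bold":String) ∈ (["Semi Bold", "Demi Bold", "Extra Bold", "Extra Black"]:List String) then PySem.Str.replace "Extra Bold" " " "" else "Extra Bold") = "ExtraBold" from by decide]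
  by_cases h4 : "semibold".toList <:+ PySem.Chars.lower v.toList
  · have hb : ((8:Int)) ≤ (v.toList.length : Int) := pvSufLen v 8 (by decide) h4
    have nk_semi_bold : ¬ ("semi bold".toList) <:+ PySem.Chars.lower v.toList := pvKill "semibold".toList "semi bold".toList h4 (by decide) (by decide)
    have nk_demi_bold : ¬ ("demi bold".toList) <:+ PySem.Chars.lower v.toList := pvKill "semibold".toList "demi bold".toList h4 (by decide) (by decide)
    rw [pvALoop_skip v "Extra Black" _ (by rw [pvCondEq v "Extra Black" "extra black".toList (by decide)]; exact pvEndsFalse h1), pvALoop_skip v "ExtraBold" _ (by rw [pvCondEq v "ExtraBold" "extrabold".toList (by decide)]; exact pvEndsFalse h2), pvALoop_skip v "Extra Bold" _ (by rw [pvCondEq v "Extra Bold" "extra bold".toList (by decide)]; exact pvEndsFalse h3), pvALoop_hit v "SemiBold" _ (by rw [pvCondEq v "SemiBold" "semibold".toList (by decide)]; exact pvEndsTrue h4)]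
    rw [pvBLoop_skip v (PySem.Str.lower v) _ _ _ (fun hg => by rw [pvGet11 v hg, pvEndsFalse h1]; simp)]
    rw [pvBLoop_skip v (PySem.Str.lower v) _ _ _ (fun hg => by rw [pvGet10 v hg, pvEndsFalse h3]; simp)]
    rw [pvBLoop_skip v (PySem.Str.lower v) _ _ _ (fun hg => by rw [pvGet9 v hg, pvEndsFalse h2, pvEndsFalse nk_semi_bold, pvEndsFalse nk_demi_bold]; simp)]
    rw [pvBLoop_hit v (PySem.Str.lower v) _ _ _ hb "SemiBold" (by rw [pvGet8 v hb, pvEndsTrue h4]; simp)]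
    rw [pvFamEq v (-(PySem.Str.len "SemiBold")) ((v.toList.length : Int) - 8) 8 (by decide) (by norm_num) (by norm_num) (by exact_mod_cast hb)]
    rw [show (if ("SemiBold":String) ∈ (["Semi Bold", "Demi Bold", "Extra Bold", "Extra Black"]:List String) then PySem.Str.replace "SemiBold" " " "" else "SemiBold") = "SemiBold" from by decide]
  by_cases h5 : "semi bold".toList <:+ PySem.Chars.lower v.toList
  · have hb : ((9:Int)) ≤ (v.toList.length : Int) := pvSufLen v 9 (by decide) h5
    rw [pvALoop_skip v "Extra Black" _ (by rw [pvCondEq v "Extra Black" "extra black".toList (by decide)]; exact pvEndsFalse h1), pvALoop_skip v "ExtraBold" _ (by rw [pvCondEq v "ExtraBold" "extrabold".toList (by decide)]; exact pvEndsFalse h2), pvALoop_skip v "Extra Bold" _ (by rw [pvCondEq v "Extra Bold" "extra bold".toList (by decide)]; exact pvEndsFalse h3), pvALoop_skip v "SemiBold" _ (by rw [pvCondEq v "SemiBold" "semibold".toList (by decide)]; exact pvEndsFalse h4), pvALoop_hit v "Semi Bold" _ (by rw [pvCondEq v "Semi Bold" "semi bold".toList (by decide)]; exact pvEndsTrue 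h5)]
    rw [pvBLoop_skip v (PySem.Str.lower v) _ _ _ (fun hg => by rw [pvGet11 v hg, pvEndsFalse h1]; simp)]
    rw [pvBLoop_skip v (PySem.Str.lower v) _ _ _ (fun hg => by rw [pvGet10 v hg, pvEndsFalse h3]; simp)]
    rw [pvBLoop_hit v (PySem.Str.lower v) _ _ _ hb "SemiBold" (by rw [pvGet9 v hb, pvEndsFalse h2, pvEndsTrue h5]; simp)]
    rw [pvFamEq v (-(PySem.Str.len "Semi Bold")) ((v.toList.length : Int) - 9) 9 (by decide) (by norm_num) (by norm_num) (by exact_mod_cast hb)]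
    rw [show (if ("Semi Bold":String) ∈ (["Semi Bold", "Demi Bold", "Extra Bold", "Extra Black"]:List String) then PySem.Str.replace "Semi Bold" " " "" else "Semi Bold") = "SemiBold" from by decide]
  by_cases h6 : "demibold".toList <:+ PySem.Chars.lower v.toList
  · have hb : ((8:Int)) ≤ (v.toList.length : Int) := pvSufLen v 8 (by decide) h6
    have nk_demi_bold : ¬ ("demi bold".toList) <:+ PySem.Chars.lower v.toList := pvKill "demibold".toList "demi bold".toList h6 (by decide) (by decide)
    rw [pvALoop_skip v "Extra Black" _ (by rw [pvCondEq v "Extra Black" "extra black".toList (by decide)]; exact pvEndsFalse h1), pvALoop_skip v "ExtraBold" _ (by rw [pvCondEq v "ExtraBold" "extrabold".toList (by decide)]; exact pvEndsFalse h2), pvALoop_skip v "Extra Bold" _ (by rw [pvCondEq v "Extra Bold" "extra bold".toList (by decide)]; exact pvEndsFalse h3), pvALoop_skip v "SemiBold" _ (by rw [pvCondEq v "SemiBold" "semibold".toList (by decide)]; exact pvEndsFalse h4), pvALoop_skip v "Semi Bold" _ (by rw [pvCondEq v "Semi Bold" "semi bold".toList (by decide)]; exact pvEndsFalse h5), pvALoop_hit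 v "DemiBold" _ (by rw [pvCondEq v "DemiBold" "demibold".toList (by decide)]; exact pvEndsTrue h6)]
    rw [pvBLoop_skip v (PySem.Str.lower v) _ _ _ (fun hg => by rw [pvGet11 v hg, pvEndsFalse h1]; simp)]
    rw [pvBLoop_skip v (PySem.Str.lower v) _ _ _ (fun hg => by rw [pvGet10 v hg, pvEndsFalse h3]; simp)]
    rw [pvBLoop_skip v (PySem.Str.lower v) _ _ _ (fun hg => by rw [pvGet9 v hg, pvEndsFalse h2, pvEndsFalse h5, pvEndsFalse nk_demi_bold]; simp)]
    rw [pvBLoop_hit v (PySem.Str.lower v) _ _ _ hb "DemiBold" (by rw [pvGet8 v hb, pvEndsFalse h4, pvEndsTrue h6]; simp)]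
    rw [pvFamEq v (-(PySem.Str.len "DemiBold")) ((v.toList.length : Int) - 8) 8 (by decide) (by norm_num) (by norm_num) (by exact_mod_cast hb)]
    rw [show (if ("DemiBold":String) ∈ (["Semi Bold", "Demi Bold", "Extra Bold", "Extra Black"]:List String) then PySem.Str.replace "DemiBold" " " "" else "DemiBold") = "DemiBold" from by decide]
  by_cases h7 : "demi bold".toList <:+ PySem.Chars.lower v.toList
  · have hb : ((9:Int)) ≤ (v.toList.length : Int) := pvSufLen v 9 (by decide) h7
    rw [pvALoop_skip v "Extra Black" _ (by rw [pvCondEq v "Extra Black" "extra black".toList (by decide)]; exact pvEndsFalse h1), pvALoop_skip v "ExtraBold" _ (by rw [pvCondEq v "ExtraBold" "extrabold".toList (by decide)]; exact pvEndsFalse h2), pvALoop_skip v "Extra Bold" _ (by rw [pvCondEq v "Extra Bold" "extra bold".toList (by decide)]; exact pvEndsFalse h3), pvALoop_skip v "SemiBold" _ (by rw [pvCondEq v "SemiBold" "semibold".toList (by decide)]; exact pvEndsFalse h4), pvALoop_skip v "Semi Bold" _ (by rw [pvCondEq v "Semi Bold" "semi bold".toList (by decide)]; exact pvEndsFalse h5),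 pvALoop_skip v "DemiBold" _ (by rw [pvCondEq v "DemiBold" "demibold".toList (by decide)]; exact pvEndsFalse h6), pvALoop_hit v "Demi Bold" _ (by rw [pvCondEq v "Demi Bold" "demi bold".toList (by decide)]; exact pvEndsTrue h7)]
    rw [pvBLoop_skip v (PySem.Str.lower v) _ _ _ (fun hg => by rw [pvGet11 v hg, pvEndsFalse h1]; simp)]
    rw [pvBLoop_skip v (PySem.Str.lower v) _ _ _ (fun hg => by rw [pvGet10 v hg, pvEndsFalse h3]; simp)]
    rw [pvBLoop_hit v (PySem.Str.lower v) _ _ _ hb "DemiBold" (by rw [pvGet9 v hb, pvEndsFalse h2, pvEndsFalse h5, pvEndsTrue h7]; simp)]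
    rw [pvFamEq v (-(PySem.Str.len "Demi Bold")) ((v.toList.length : Int) - 9) 9 (by decide) (by norm_num) (by norm_num) (by exact_mod_cast hb)]
    rw [show (if ("Demi Bold":String) ∈ (["Semi Bold", "Demi Bold", "Extra Bold", "Extra Black"]:List String) then PySem.Str.replace "Demi Bold" " " "" else "Demi Bold") = "DemiBold" from by decide]
  by_cases h8 : "black".toList <:+ PySem.Chars.lower v.toList
  · have hb : ((5:Int)) ≤ (v.toList.length : Int) := pvSufLen v 5 (by decide) h8
    have nk_regular : ¬ ("regular".toList) <:+ PySem.Chars.lower v.toList := pvKill "black".toList "regular".toList h8 (by decide) (by decide)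
    have nk_medium : ¬ ("medium".toList) <:+ PySem.Chars.lower v.toList := pvKill "black".toList "medium".toList h8 (by decide) (by decide)
    rw [pvALoop_skip v "Extra Black" _ (by rw [pvCondEq v "Extra Black" "extra black".toList (by decide)]; exact pvEndsFalse h1), pvALoop_skip v "ExtraBold" _ (by rw [pvCondEq v "ExtraBold" "extrabold".toList (by decide)]; exact pvEndsFalse h2), pvALoop_skip v "Extra Bold" _ (by rw [pvCondEq v "Extra Bold" "extra bold".toList (by decide)]; exact pvEndsFalse h3), pvALoop_skip v "SemiBold" _ (by rw [pvCondEq v "SemiBold" "semibold".toList (by decide)]; exact pvEndsFalse h4), pvALoop_skip v "Semi Bold" _ (by rw [pvCondEq v "Semi Bold" "semi bold".toList (by decide)]; exact pvEndsFalse h5), pvALoop_skip v "DemiBold" _ (by rw [pvCondEq v "DemiBold" "demibold".toList (by decide)]; exact pvEndsFalse h6), pvALoop_skip v "Demi Bold" _ (by rw [pvCondEq v "Demi Bold" "demi bold".toList (by decide)]; exact pvEndsFalse h7), pvALoop_hit v "Black" _ (by rw [pvCondEq v "Black" "black".toList (by decide)]; exact pvEndsTrue h8)]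
    rw [pvBLoop_skip v (PySem.Str.lower v) _ _ _ (fun hg => by rw [pvGet11 v hg, pvEndsFalse h1]; simp)]
    rw [pvBLoop_skip v (PySem.Str.lower v) _ _ _ (fun hg => by rw [pvGet10 v hg, pvEndsFalse h3]; simp)]
    rw [pvBLoop_skip v (PySem.Str.lower v) _ _ _ (fun hg => by rw [pvGet9 v hg, pvEndsFalse h2, pvEndsFalse h5, pvEndsFalse h7]; simp)]
    rw [pvBLoop_skip v (PySem.Str.lower v) _ _ _ (fun hg => by rw [pvGet8 v hg, pvEndsFalse h4, pvEndsFalse h6]; simp)]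
    rw [pvBLoop_skip v (PySem.Str.lower v) _ _ _ (fun hg => by rw [pvGet7 v hg, pvEndsFalse nk_regular]; simp)]
    rw [pvBLoop_skip v (PySem.Str.lower v) _ _ _ (fun hg => by rw [pvGet6 v hg, pvEndsFalse nk_medium]; simp)]
    rw [pvBLoop_hit v (PySem.Str.lower v) _ _ _ hb "Black" (by rw [pvGet5 v hb, pvEndsTrue h8]; simp)]
    rw [pvFamEq v (-(PySem.Str.len "Black")) ((v.toList.length : Int) - 5) 5 (by decide) (by norm_num) (by norm_num) (by exact_mod_cast hb)]
    rw [show (if ("Black":String) ∈ (["Semi Bold", "Demi Bold", "Extra Bold", "Extra Black"]:List String) then PySem.Str.replace "Black" " " "" else "Black") = "Black" from by decide]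
  by_cases h9 : "bold".toList <:+ PySem.Chars.lower v.toList
  · have hb : ((4:Int)) ≤ (v.toList.length : Int) := pvSufLen v 4 (by decide) h9
    have nk_regular : ¬ ("regular".toList) <:+ PySem.Chars.lower v.toList := pvKill "bold".toList "regular".toList h9 (by decide) (by decide)
    have nk_medium : ¬ ("medium".toList) <:+ PySem.Chars.lower v.toList := pvKill "bold".toList "medium".toList h9 (by decide) (by decide)
    have nk_light : ¬ ("light".toList) <:+ PySem.Chars.lower v.toList := pvKill "bold".toList "light".toList h9 (by decide) (by decide)
    have nk_roman : ¬ ("roman".toList) <:+ PySem.Chars.lower v.toList := pvKill "bold".toList "roman".toList h9 (by decide) (by decide)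
    rw [pvALoop_skip v "Extra Black" _ (by rw [pvCondEq v "Extra Black" "extra black".toList (by decide)]; exact pvEndsFalse h1), pvALoop_skip v "ExtraBold" _ (by rw [pvCondEq v "ExtraBold" "extrabold".toList (by decide)]; exact pvEndsFalse h2), pvALoop_skip v "Extra Bold" _ (by rw [pvCondEq v "Extra Bold" "extra bold".toList (by decide)]; exact pvEndsFalse h3), pvALoop_skip v "SemiBold" _ (by rw [pvCondEq v "SemiBold" "semibold".toList (by decide)]; exact pvEndsFalse h4), pvALoop_skip v "Semi Bold" _ (by rw [pvCondEq v "Semi Bold" "semi bold".toList (by decide)]; exact pvEndsFalse h5), pvALoop_skip v "DemiBold" _ (by rw [pvCondEq v "DemiBold" "demibold".toList (by decide)]; exact pvEndsFalse h6), pvALoop_skip v "Demi Bold" _ (by rw [pvCondEq v "Demi Bold" "demi bold".toList (by decide)]; exact pvEndsFalse h7), pvALoop_skip v "Black" _ (by rw [pvCondEq v "Black" "black".toList (by decide)]; exact pvEndsFalse h8), pvALoop_hit v "Bold" _ (by rw [pvCondEq v "Bold" "bold".toList (by decide)]; exact pvEndsTrue h9)]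
    rw [pvBLoop_skip v (PySem.Str.lower v) _ _ _ (fun hg => by rw [pvGet11 v hg, pvEndsFalse h1]; simp)]
    rw [pvBLoop_skip v (PySem.Str.lower v) _ _ _ (fun hg => by rw [pvGet10 v hg, pvEndsFalse h3]; simp)]
    rw [pvBLoop_skip v (PySem.Str.lower v) _ _ _ (fun hg => by rw [pvGet9 v hg, pvEndsFalse h2, pvEndsFalse h5, pvEndsFalse h7]; simp)]
    rw [pvBLoop_skip v (PySem.Str.lower v) _ _ _ (fun hg => by rw [pvGet8 v hg, pvEndsFalse h4, pvEndsFalse h6]; simp)]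
    rw [pvBLoop_skip v (PySem.Str.lower v) _ _ _ (fun hg => by rw [pvGet7 v hg, pvEndsFalse nk_regular]; simp)]
    rw [pvBLoop_skip v (PySem.Str.lower v) _ _ _ (fun hg => by rw [pvGet6 v hg, pvEndsFalse nk_medium]; simp)]
    rw [pvBLoop_skip v (PySem.Str.lower v) _ _ _ (fun hg => by rw [pvGet5 v hg, pvEndsFalse h8, pvEndsFalse nk_light, pvEndsFalse nk_roman]; simp)]
    rw [pvBLoop_hit v (PySem.Str.lower v) _ _ _ hb "Bold" (by rw [pvGet4 v hb, pvEndsTrue h9]; simp)]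
    rw [pvFamEq v (-(PySem.Str.len "Bold")) ((v.toList.length : Int) - 4) 4 (by decide) (by norm_num) (by norm_num) (by exact_mod_cast hb)]
    rw [show (if ("Bold":String) ∈ (["Semi Bold", "Demi Bold", "Extra Bold", "Extra Black"]:List String) then PySem.Str.replace "Bold" " " "" else "Bold") = "Bold" from by decide]
  by_cases h10 : "medium".toList <:+ PySem.Chars.lower v.toList
  · have hb : ((6:Int)) ≤ (v.toList.length : Int) := pvSufLen v 6 (by decide) h10
    have nk_regular : ¬ ("regular".toList) <:+ PySem.Chars.lower v.toList := pvKill "medium".toList "regular".toList h10 (by decide) (by decide)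
    rw [pvALoop_skip v "Extra Black" _ (by rw [pvCondEq v "Extra Black" "extra black".toList (by decide)]; exact pvEndsFalse h1), pvALoop_skip v "ExtraBold" _ (by rw [pvCondEq v "ExtraBold" "extrabold".toList (by decide)]; exact pvEndsFalse h2), pvALoop_skip v "Extra Bold" _ (by rw [pvCondEq v "Extra Bold" "extra bold".toList (by decide)]; exact pvEndsFalse h3), pvALoop_skip v "SemiBold" _ (by rw [pvCondEq v "SemiBold" "semibold".toList (by decide)]; exact pvEndsFalse h4), pvALoop_skip v "Semi Bold" _ (by rw [pvCondEq v "Semi Bold" "semi bold".toList (by decide)]; exact pvEndsFalse h5), pvALoop_skip v "DemiBold" _ (by rw [pvCondEq v "DemiBold" "demibold".toList (by decide)]; exact pvEndsFalse h6), pvALoop_skip v "Demi Bold" _ (by rw [pvCondEq v "Demi Bold" "demi bold".toList (by decide)]; exact pvEndsFalse h7), pvALoop_skip v "Black" _ (by rw [pvCondEq v "Black" "black".toList (by decide)]; exact pvEndsFalse h8), pvALoop_skip v "Bold" _ (by rw [pvCondEq v "Bold" "bold".toList (by decide)]; exact pvEndsFalse h9), pvALoop_hit v "Medium" _ (by rw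 [pvCondEq v "Medium" "medium".toList (by decide)]; exact pvEndsTrue h10)]
    rw [pvBLoop_skip v (PySem.Str.lower v) _ _ _ (fun hg => by rw [pvGet11 v hg, pvEndsFalse h1]; simp)]
    rw [pvBLoop_skip v (PySem.Str.lower v) _ _ _ (fun hg => by rw [pvGet10 v hg, pvEndsFalse h3]; simp)]
    rw [pvBLoop_skip v (PySem.Str.lower v) _ _ _ (fun hg => by rw [pvGet9 v hg, pvEndsFalse h2, pvEndsFalse h5, pvEndsFalse h7]; simp)]
    rw [pvBLoop_skip v (PySem.Str.lower v) _ _ _ (fun hg => by rw [pvGet8 v hg, pvEndsFalse h4, pvEndsFalse h6]; simp)]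
    rw [pvBLoop_skip v (PySem.Str.lower v) _ _ _ (fun hg => by rw [pvGet7 v hg, pvEndsFalse nk_regular]; simp)]
    rw [pvBLoop_hit v (PySem.Str.lower v) _ _ _ hb "Medium" (by rw [pvGet6 v hb, pvEndsTrue h10]; simp)]
    rw [pvFamEq v (-(PySem.Str.len "Medium")) ((v.toList.length : Int) - 6) 6 (by decide) (by norm_num) (by norm_num) (by exact_mod_cast hb)]
    rw [show (if ("Medium":String) ∈ (["Semi Bold", "Demi Bold", "Extra Bold", "Extra Black"]:List String) then PySem.Str.replace "Medium" " " "" else "Medium") = "Medium" from by decide]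
  by_cases h11 : "light".toList <:+ PySem.Chars.lower v.toList
  · have hb : ((5:Int)) ≤ (v.toList.length : Int) := pvSufLen v 5 (by decide) h11
    have nk_regular : ¬ ("regular".toList) <:+ PySem.Chars.lower v.toList := pvKill "light".toList "regular".toList h11 (by decide) (by decide)
    rw [pvALoop_skip v "Extra Black" _ (by rw [pvCondEq v "Extra Black" "extra black".toList (by decide)]; exact pvEndsFalse h1), pvALoop_skip v "ExtraBold" _ (by rw [pvCondEq v "ExtraBold" "extrabold".toList (by decide)]; exact pvEndsFalse h2), pvALoop_skip v "Extra Bold" _ (by rw [pvCondEq v "Extra Bold" "extra bold".toList (by decide)]; exact pvEndsFalse h3), pvALoop_skip v "SemiBold" _ (by rw [pvCondEq v "SemiBold" "semibold".toList (by decide)]; exact pvEndsFalse h4), pvALoop_skip v "Semi Bold" _ (by rw [pvCondEq v "Semi Bold" "semi bold".toList (by decide)]; exact pvEndsFalse h5), pvALoop_skip v "DemiBold" _ (by rw [pvCondEq v "DemiBold" "demibold".toList (by decide)]; exact pvEndsFalse h6), pvALoop_skip v "Demi Bold" _ (by rw [pvCondEq v "Demi Bold" "demi bold".toList (by decide)];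 exact pvEndsFalse h7), pvALoop_skip v "Black" _ (by rw [pvCondEq v "Black" "black".toList (by decide)]; exact pvEndsFalse h8), pvALoop_skip v "Bold" _ (by rw [pvCondEq v "Bold" "bold".toList (by decide)]; exact pvEndsFalse h9), pvALoop_skip v "Medium" _ (by rw [pvCondEq v "Medium" "medium".toList (by decide)]; exact pvEndsFalse h10), pvALoop_hit v "Light" _ (by rw [pvCondEq v "Light" "light".toList (by decide)]; exact pvEndsTrue h11)]
    rw [pvBLoop_skip v (PySem.Str.lower v) _ _ _ (fun hg => by rw [pvGet11 v hg, pvEndsFalse h1]; simp)]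
    rw [pvBLoop_skip v (PySem.Str.lower v) _ _ _ (fun hg => by rw [pvGet10 v hg, pvEndsFalse h3]; simp)]
    rw [pvBLoop_skip v (PySem.Str.lower v) _ _ _ (fun hg => by rw [pvGet9 v hg, pvEndsFalse h2, pvEndsFalse h5, pvEndsFalse h7]; simp)]
    rw [pvBLoop_skip v (PySem.Str.lower v) _ _ _ (fun hg => by rw [pvGet8 v hg, pvEndsFalse h4, pvEndsFalse h6]; simp)]
    rw [pvBLoop_skip v (PySem.Str.lower v) _ _ _ (fun hg => by rw [pvGet7 v hg, pvEndsFalse nk_regular]; simp)]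
    rw [pvBLoop_skip v (PySem.Str.lower v) _ _ _ (fun hg => by rw [pvGet6 v hg, pvEndsFalse h10]; simp)]
    rw [pvBLoop_hit v (PySem.Str.lower v) _ _ _ hb "Light" (by rw [pvGet5 v hb, pvEndsFalse h8, pvEndsTrue h11]; simp)]
    rw [pvFamEq v (-(PySem.Str.len "Light")) ((v.toList.length : Int) - 5) 5 (by decide) (by norm_num) (by norm_num) (by exact_mod_cast hb)]
    rw [show (if ("Light":String) ∈ (["Semi Bold", "Demi Bold", "Extra Bold", "Extra Black"]:List String) then PySem.Str.replace "Light" " " "" else "Light") = "Light" from by decide]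
  by_cases h12 : "thin".toList <:+ PySem.Chars.lower v.toList
  · have hb : ((4:Int)) ≤ (v.toList.length : Int) := pvSufLen v 4 (by decide) h12
    have nk_regular : ¬ ("regular".toList) <:+ PySem.Chars.lower v.toList := pvKill "thin".toList "regular".toList h12 (by decide) (by decide)
    have nk_roman : ¬ ("roman".toList) <:+ PySem.Chars.lower v.toList := pvKill "thin".toList "roman".toList h12 (by decide) (by decide)
    rw [pvALoop_skip v "Extra Black" _ (by rw [pvCondEq v "Extra Black" "extra black".toList (by decide)]; exact pvEndsFalse h1), pvALoop_skip v "ExtraBold" _ (by rw [pvCondEq v "ExtraBold" "extrabold".toList (by decide)]; exact pvEndsFalse h2), pvALoop_skip v "Extra Bold" _ (by rw [pvCondEq v "Extra Bold" "extra bold".toList (by decide)]; exact pvEndsFalse h3), pvALoop_skip v "SemiBold" _ (by rw [pvCondEq v "SemiBold" "semibold".toList (by decide)]; exact pvEndsFalse h4), pvALoop_skip v "Semi Bold" _ (by rw [pvCondEq v "Semi Bold" "semi bold".toList (by decide)]; exact pvEndsFalse h5), pvALoop_skip v "DemiBold" _ (by rw [pvCondEq v "DemiBold" "demibold".toList (by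 decide)]; exact pvEndsFalse h6), pvALoop_skip v "Demi Bold" _ (by rw [pvCondEq v "Demi Bold" "demi bold".toList (by decide)]; exact pvEndsFalse h7), pvALoop_skip v "Black" _ (by rw [pvCondEq v "Black" "black".toList (by decide)]; exact pvEndsFalse h8), pvALoop_skip v "Bold" _ (by rw [pvCondEq v "Bold" "bold".toList (by decide)]; exact pvEndsFalse h9), pvALoop_skip v "Medium" _ (by rw [pvCondEq v "Medium" "medium".toList (by decide)]; exact pvEndsFalse h10), pvALoop_skip v "Light" _ (by rw [pvCondEq v "Light" "light".toList (by decide)]; exact pvEndsFalse h11), pvALoop_hit v "Thin" _ (by rw [pvCondEq v "Thin" "thin".toList (by decide)]; exact pvEndsTrue h12)]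
    rw [pvBLoop_skip v (PySem.Str.lower v) _ _ _ (fun hg => by rw [pvGet11 v hg, pvEndsFalse h1]; simp)]
    rw [pvBLoop_skip v (PySem.Str.lower v) _ _ _ (fun hg => by rw [pvGet10 v hg, pvEndsFalse h3]; simp)]
    rw [pvBLoop_skip v (PySem.Str.lower v) _ _ _ (fun hg => by rw [pvGet9 v hg, pvEndsFalse h2, pvEndsFalse h5, pvEndsFalse h7]; simp)]
    rw [pvBLoop_skip v (PySem.Str.lower v) _ _ _ (fun hg => by rw [pvGet8 v hg, pvEndsFalse h4, pvEndsFalse h6]; simp)]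
    rw [pvBLoop_skip v (PySem.Str.lower v) _ _ _ (fun hg => by rw [pvGet7 v hg, pvEndsFalse nk_regular]; simp)]
    rw [pvBLoop_skip v (PySem.Str.lower v) _ _ _ (fun hg => by rw [pvGet6 v hg, pvEndsFalse h10]; simp)]
    rw [pvBLoop_skip v (PySem.Str.lower v) _ _ _ (fun hg => by rw [pvGet5 v hg, pvEndsFalse h8, pvEndsFalse h11, pvEndsFalse nk_roman]; simp)]
    rw [pvBLoop_hit v (PySem.Str.lower v) _ _ _ hb "Thin" (by rw [pvGet4 v hb, pvEndsFalse h9, pvEndsTrue h12]; simp)]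
    rw [pvFamEq v (-(PySem.Str.len "Thin")) ((v.toList.length : Int) - 4) 4 (by decide) (by norm_num) (by norm_num) (by exact_mod_cast hb)]
    rw [show (if ("Thin":String) ∈ (["Semi Bold", "Demi Bold", "Extra Bold", "Extra Black"]:List String) then PySem.Str.replace "Thin" " " "" else "Thin") = "Thin" from by decide]
  by_cases h13 : "regular".toList <:+ PySem.Chars.lower v.toList
  · have hb : ((7:Int)) ≤ (v.toList.length : Int) := pvSufLen v 7 (by decide) h13
    rw [pvALoop_skip v "Extra Black" _ (by rw [pvCondEq v "Extra Black" "extra black".toList (by decide)]; exact pvEndsFalse h1), pvALoop_skip v "ExtraBold" _ (by rw [pvCondEq v "ExtraBold" "extrabold".toList (by decide)]; exact pvEndsFalse h2), pvALoop_skip v "Extra Bold" _ (by rw [pvCondEq v "Extra Bold" "extra bold".toList (by decide)]; exact pvEndsFalse h3), pvALoop_skip v "SemiBold" _ (by rw [pvCondEq v "SemiBold" "semibold".toList (by decide)]; exact pvEndsFalse h4), pvALoop_skip v "Semi Bold" _ (by rw [pvCondEq v "Semi Bold" "semi bold".toList (by decide)]; exact pvEndsFalse h5), pvALoop_skip v "DemiBold"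 _ (by rw [pvCondEq v "DemiBold" "demibold".toList (by decide)]; exact pvEndsFalse h6), pvALoop_skip v "Demi Bold" _ (by rw [pvCondEq v "Demi Bold" "demi bold".toList (by decide)]; exact pvEndsFalse h7), pvALoop_skip v "Black" _ (by rw [pvCondEq v "Black" "black".toList (by decide)]; exact pvEndsFalse h8), pvALoop_skip v "Bold" _ (by rw [pvCondEq v "Bold" "bold".toList (by decide)]; exact pvEndsFalse h9), pvALoop_skip v "Medium" _ (by rw [pvCondEq v "Medium" "medium".toList (by decide)]; exact pvEndsFalse h10), pvALoop_skip v "Light" _ (by rw [pvCondEq v "Light" "light".toList (by decide)]; exact pvEndsFalse h11), pvALoop_skip v "Thin" _ (by rw [pvCondEq v "Thin" "thin".toList (by decide)]; exact pvEndsFalse h12), pvALoop_hit v "Regular" _ (by rw [pvCondEq v "Regular" "regular".toList (by decide)]; exact pvEndsTrue h13)]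
    rw [pvBLoop_skip v (PySem.Str.lower v) _ _ _ (fun hg => by rw [pvGet11 v hg, pvEndsFalse h1]; simp)]
    rw [pvBLoop_skip v (PySem.Str.lower v) _ _ _ (fun hg => by rw [pvGet10 v hg, pvEndsFalse h3]; simp)]
    rw [pvBLoop_skip v (PySem.Str.lower v) _ _ _ (fun hg => by rw [pvGet9 v hg, pvEndsFalse h2, pvEndsFalse h5, pvEndsFalse h7]; simp)]
    rw [pvBLoop_skip v (PySem.Str.lower v) _ _ _ (fun hg => by rw [pvGet8 v hg, pvEndsFalse h4, pvEndsFalse h6]; simp)]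
    rw [pvBLoop_hit v (PySem.Str.lower v) _ _ _ hb "Regular" (by rw [pvGet7 v hb, pvEndsTrue h13]; simp)]
    rw [pvFamEq v (-(PySem.Str.len "Regular")) ((v.toList.length : Int) - 7) 7 (by decide) (by norm_num) (by norm_num) (by exact_mod_cast hb)]
    rw [show (if ("Regular":String) ∈ (["Semi Bold", "Demi Bold", "Extra Bold", "Extra Black"]:List String) then PySem.Str.replace "Regular" " " "" else "Regular") = "Regular" from by decide]
  by_cases h14 : "book".toList <:+ PySem.Chars.lower v.toList
  · have hb : ((4:Int)) ≤ (v.toList.length : Int) := pvSufLen v 4 (by decide) h14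
    have nk_roman : ¬ ("roman".toList) <:+ PySem.Chars.lower v.toList := pvKill "book".toList "roman".toList h14 (by decide) (by decide)
    rw [pvALoop_skip v "Extra Black" _ (by rw [pvCondEq v "Extra Black" "extra black".toList (by decide)]; exact pvEndsFalse h1), pvALoop_skip v "ExtraBold" _ (by rw [pvCondEq v "ExtraBold" "extrabold".toList (by decide)]; exact pvEndsFalse h2), pvALoop_skip v "Extra Bold" _ (by rw [pvCondEq v "Extra Bold" "extra bold".toList (by decide)]; exact pvEndsFalse h3), pvALoop_skip v "SemiBold" _ (by rw [pvCondEq v "SemiBold" "semibold".toList (by decide)]; exact pvEndsFalse h4), pvALoop_skip v "Semi Bold" _ (by rw [pvCondEq v "Semi Bold" "semi bold".toList (by decide)]; exact pvEndsFalse h5), pvALoop_skip v "DemiBold" _ (by rw [pvCondEq v "DemiBold" "demibold".toList (by decide)]; exact pvEndsFalse h6), pvALoop_skip v "Demi Bold" _ (by rw [pvCondEq v "Demi Bold" "demi bold".toList (by decide)]; exact pvEndsFalse h7), pvALoop_skip v "Black" _ (by rw [pvCondEq v "Black" "black".toList (by decide)]; exact pvEndsFalse h8), pvALoop_skip v "Bold"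 _ (by rw [pvCondEq v "Bold" "bold".toList (by decide)]; exact pvEndsFalse h9), pvALoop_skip v "Medium" _ (by rw [pvCondEq v "Medium" "medium".toList (by decide)]; exact pvEndsFalse h10), pvALoop_skip v "Light" _ (by rw [pvCondEq v "Light" "light".toList (by decide)]; exact pvEndsFalse h11), pvALoop_skip v "Thin" _ (by rw [pvCondEq v "Thin" "thin".toList (by decide)]; exact pvEndsFalse h12), pvALoop_skip v "Regular" _ (by rw [pvCondEq v "Regular" "regular".toList (by decide)]; exact pvEndsFalse h13), pvALoop_hit v "Book" _ (by rw [pvCondEq v "Book" "book".toList (by decide)]; exact pvEndsTrue h14)]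
    rw [pvBLoop_skip v (PySem.Str.lower v) _ _ _ (fun hg => by rw [pvGet11 v hg, pvEndsFalse h1]; simp)]
    rw [pvBLoop_skip v (PySem.Str.lower v) _ _ _ (fun hg => by rw [pvGet10 v hg, pvEndsFalse h3]; simp)]
    rw [pvBLoop_skip v (PySem.Str.lower v) _ _ _ (fun hg => by rw [pvGet9 v hg, pvEndsFalse h2, pvEndsFalse h5, pvEndsFalse h7]; simp)]
    rw [pvBLoop_skip v (PySem.Str.lower v) _ _ _ (fun hg => by rw [pvGet8 v hg, pvEndsFalse h4, pvEndsFalse h6]; simp)]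
    rw [pvBLoop_skip v (PySem.Str.lower v) _ _ _ (fun hg => by rw [pvGet7 v hg, pvEndsFalse h13]; simp)]
    rw [pvBLoop_skip v (PySem.Str.lower v) _ _ _ (fun hg => by rw [pvGet6 v hg, pvEndsFalse h10]; simp)]
    rw [pvBLoop_skip v (PySem.Str.lower v) _ _ _ (fun hg => by rw [pvGet5 v hg, pvEndsFalse h8, pvEndsFalse h11, pvEndsFalse nk_roman]; simp)]
    rw [pvBLoop_hit v (PySem.Str.lower v) _ _ _ hb "Book" (by rw [pvGet4 v hb, pvEndsFalse h9, pvEndsFalse h12, pvEndsTrue h14]; simp)]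
    rw [pvFamEq v (-(PySem.Str.len "Book")) ((v.toList.length : Int) - 4) 4 (by decide) (by norm_num) (by norm_num) (by exact_mod_cast hb)]
    rw [show (if ("Book":String) ∈ (["Semi Bold", "Demi Bold", "Extra Bold", "Extra Black"]:List String) then PySem.Str.replace "Book" " " "" else "Book") = "Book" from by decide]
  by_cases h15 : "roman".toList <:+ PySem.Chars.lower v.toList
  · have hb : ((5:Int)) ≤ (v.toList.length : Int) := pvSufLen v 5 (by decide) h15
    rw [pvALoop_skip v "Extra Black" _ (by rw [pvCondEq v "Extra Black" "extra black".toList (by decide)]; exact pvEndsFalse h1), pvALoop_skip v "ExtraBold" _ (by rw [pvCondEq v "ExtraBold" "extrabold".toList (by decide)]; exact pvEndsFalse h2), pvALoop_skip v "Extra Bold" _ (by rw [pvCondEq v "Extra Bold" "extra bold".toList (by decide)]; exact pvEndsFalse h3), pvALoop_skip v "SemiBold" _ (by rw [pvCondEq v "SemiBold" "semibold".toList (by decide)]; exact pvEndsFalse h4), pvALoop_skip v "Semi Bold" _ (by rw [pvCondEq v "Semi Bold" "semi bold".toList (by decide)]; exact pvEndsFalse h5), pvALoop_skip v "DemiBold"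 _ (by rw [pvCondEq v "DemiBold" "demibold".toList (by decide)]; exact pvEndsFalse h6), pvALoop_skip v "Demi Bold" _ (by rw [pvCondEq v "Demi Bold" "demi bold".toList (by decide)]; exact pvEndsFalse h7), pvALoop_skip v "Black" _ (by rw [pvCondEq v "Black" "black".toList (by decide)]; exact pvEndsFalse h8), pvALoop_skip v "Bold" _ (by rw [pvCondEq v "Bold" "bold".toList (by decide)]; exact pvEndsFalse h9), pvALoop_skip v "Medium" _ (by rw [pvCondEq v "Medium" "medium".toList (by decide)]; exact pvEndsFalse h10), pvALoop_skip v "Light" _ (by rw [pvCondEq v "Light" "light".toList (by decide)]; exact pvEndsFalse h11), pvALoop_skip v "Thin" _ (by rw [pvCondEq v "Thin" "thin".toList (by decide)]; exact pvEndsFalse h12), pvALoop_skip v "Regular" _ (by rw [pvCondEq v "Regular" "regular".toList (by decide)]; exact pvEndsFalse h13), pvALoop_skip v "Book" _ (by rw [pvCondEq v "Book" "book".toList (by decide)]; exact pvEndsFalse h14), pvALoop_hit v "Roman" _ (by rw [pvCondEq v "Roman" "roman".toList (by decide)]; exact pvEndsTrue h15)]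
    rw [pvBLoop_skip v (PySem.Str.lower v) _ _ _ (fun hg => by rw [pvGet11 v hg, pvEndsFalse h1]; simp)]
    rw [pvBLoop_skip v (PySem.Str.lower v) _ _ _ (fun hg => by rw [pvGet10 v hg, pvEndsFalse h3]; simp)]
    rw [pvBLoop_skip v (PySem.Str.lower v) _ _ _ (fun hg => by rw [pvGet9 v hg, pvEndsFalse h2, pvEndsFalse h5, pvEndsFalse h7]; simp)]
    rw [pvBLoop_skip v (PySem.Str.lower v) _ _ _ (fun hg => by rw [pvGet8 v hg, pvEndsFalse h4, pvEndsFalse h6]; simp)]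
    rw [pvBLoop_skip v (PySem.Str.lower v) _ _ _ (fun hg => by rw [pvGet7 v hg, pvEndsFalse h13]; simp)]
    rw [pvBLoop_skip v (PySem.Str.lower v) _ _ _ (fun hg => by rw [pvGet6 v hg, pvEndsFalse h10]; simp)]
    rw [pvBLoop_hit v (PySem.Str.lower v) _ _ _ hb "Roman" (by rw [pvGet5 v hb, pvEndsFalse h8, pvEndsFalse h11, pvEndsTrue h15]; simp)]
    rw [pvFamEq v (-(PySem.Str.len "Roman")) ((v.toList.length : Int) - 5) 5 (by decide) (by norm_num) (by norm_num) (by exact_mod_cast hb)]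
    rw [show (if ("Roman":String) ∈ (["Semi Bold", "Demi Bold", "Extra Bold", "Extra Black"]:List String) then PySem.Str.replace "Roman" " " "" else "Roman") = "Roman" from by decide]
  have hall : ∀ s ∈ pvAStyles, ¬ PySem.Chars.lower s.toList <:+ PySem.Chars.lower v.toList := by
    intro s hs
    fin_cases hs
    · rw [show PySem.Chars.lower "Extra Black".toList = "extra black".toList from by decide]; exact h1
    · rw [show PySem.Chars.lower "ExtraBold".toList = "extrabold".toList from by decide]; exact h2
    · rw [show PySem.Chars.lower "Extra Bold".toList = "extra bold".toList from by decide]; exact h3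
    · rw [show PySem.Chars.lower "SemiBold".toList = "semibold".toList from by decide]; exact h4
    · rw [show PySem.Chars.lower "Semi Bold".toList = "semi bold".toList from by decide]; exact h5
    · rw [show PySem.Chars.lower "DemiBold".toList = "demibold".toList from by decide]; exact h6
    · rw [show PySem.Chars.lower "Demi Bold".toList = "demi bold".toList from by decide]; exact h7
    · rw [show PySem.Chars.lower "Black".toList = "black".toList from by decide]; exact h8
    · rw [show PySem.Chars.lower "Bold".toList = "bold".toList from by decide]; exact h9
    · rw [show PySem.Chars.lower "Medium".toList = "medium".toList from by decide]; exact h10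
    · rw [show PySem.Chars.lower "Light".toList = "light".toList from by decide]; exact h11
    · rw [show PySem.Chars.lower "Thin".toList = "thin".toList from by decide]; exact h12
    · rw [show PySem.Chars.lower "Regular".toList = "regular".toList from by decide]; exact h13
    · rw [show PySem.Chars.lower "Book".toList = "book".toList from by decide]; exact h14
    · rw [show PySem.Chars.lower "Roman".toList = "roman".toList from by decide]; exact h15
  rw [pvALoop_skip v "Extra Black" _ (by rw [pvCondEq v "Extra Black" "extra black".toList (by decide)]; exact pvEndsFalse h1), pvALoop_skip v "ExtraBold" _ (by rw [pvCondEq v "ExtraBold" "extrabold".toList (by decide)]; exact pvEndsFalse h2), pvALoop_skip v "Extra Bold" _ (by rw [pvCondEq v "Extra Bold" "extra bold".toList (by decide)]; exact pvEndsFalse h3), pvALoop_skip v "SemiBold" _ (by rw [pvCondEq v "SemiBold" "semibold".toList (by decide)]; exact pvEndsFalse h4), pvALoop_skip v "Semi Bold" _ (by rw [pvCondEq v "Semi Bold" "semi bold".toList (by decide)]; exact pvEndsFalse h5), pvALoop_skip v "DemiBold" _ (by rw [pvCondEq v "DemiBold" "demibold".toList (by decide)]; exact pvEndsFalse h6), pvALoop_skip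 v "Demi Bold" _ (by rw [pvCondEq v "Demi Bold" "demi bold".toList (by decide)]; exact pvEndsFalse h7), pvALoop_skip v "Black" _ (by rw [pvCondEq v "Black" "black".toList (by decide)]; exact pvEndsFalse h8), pvALoop_skip v "Bold" _ (by rw [pvCondEq v "Bold" "bold".toList (by decide)]; exact pvEndsFalse h9), pvALoop_skip v "Medium" _ (by rw [pvCondEq v "Medium" "medium".toList (by decide)]; exact pvEndsFalse h10), pvALoop_skip v "Light" _ (by rw [pvCondEq v "Light" "light".toList (by decide)]; exact pvEndsFalse h11), pvALoop_skip v "Thin" _ (by rw [pvCondEq v "Thin" "thin".toList (by decide)]; exact pvEndsFalse h12), pvALoop_skip v "Regular" _ (by rw [pvCondEq v "Regular" "regular".toList (by decide)]; exact pvEndsFalse h13), pvALoop_skip v "Book" _ (by rw [pvCondEq v "Book" "book".toList (by decide)]; exact pvEndsFalse h14), pvALoop_skip v "Roman" _ (by rw [pvCondEq v "Roman" "roman".toList (by decide)]; exact pvEndsFalse h15)]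
  rw [show pvALoop v [] = pvAFallback v from rfl, pvFallbackEq v hv hall]
  rw [pvBLoop_skip v (PySem.Str.lower v) _ _ _ (fun hg => by rw [pvGet11 v hg, pvEndsFalse h1]; simp)]
  rw [pvBLoop_skip v (PySem.Str.lower v) _ _ _ (fun hg => by rw [pvGet10 v hg, pvEndsFalse h3]; simp)]
  rw [pvBLoop_skip v (PySem.Str.lower v) _ _ _ (fun hg => by rw [pvGet9 v hg, pvEndsFalse h2, pvEndsFalse h5, pvEndsFalse h7]; simp)]
  rw [pvBLoop_skip v (PySem.Str.lower v) _ _ _ (fun hg => by rw [pvGet8 v hg, pvEndsFalse h4, pvEndsFalse h6]; simp)]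
  rw [pvBLoop_skip v (PySem.Str.lower v) _ _ _ (fun hg => by rw [pvGet7 v hg, pvEndsFalse h13]; simp)]
  rw [pvBLoop_skip v (PySem.Str.lower v) _ _ _ (fun hg => by rw [pvGet6 v hg, pvEndsFalse h10]; simp)]
  rw [pvBLoop_skip v (PySem.Str.lower v) _ _ _ (fun hg => by rw [pvGet5 v hg, pvEndsFalse h8, pvEndsFalse h11, pvEndsFalse h15]; simp)]
  rw [pvBLoop_skip v (PySem.Str.lower v) _ _ _ (fun hg => by rw [pvGet4 v hg, pvEndsFalse h9, pvEndsFalse h12, pvEndsFalse h14]; simp)]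
  rfl

-- ===== VERDICT (by name: the statement is the Claim_ definition above) =====
theorem split_family_and_style_py_spec : Claim_equal_split_family_and_style_py := by
  intro raw _hdom
  unfold Spec_split_family_and_style_py
  show split_family_and_style_py raw = split_family_and_style_py_alt raw
  rw [split_family_and_style_py, split_family_and_style_py_alt]
  by_cases h : raw = ""
  · rw [if_pos h, if_pos h]
  · rw [if_neg h, if_neg h]
    exact pvLoopsEq (PySem.Str.strip raw) (pvStripNoTrail raw)
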